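-- pv_equiv track=rewrite | github.com/emanueliwanow/smoke_project | src/BSA/IBSA.py | create_radial_offsets_coords
-- ===== SOURCE A (Python) =====
-- from itertools import product
--
-- def create_radial_offsets_coords(radius):
--         coords = {}
--         # iterate increasing over every radius value...
--         for r in range(1, radius + 1):
--             # for this radius value... (both product and range are generators too)
--             tmp_coords = product(range(-r, r + 1), repeat=2)
--             # only yield new coordinates
--             for i, j in tmp_coords:
--                 if (i, j) != (0, 0) and not coords.get((i, j), False):
--                     coords[(i, j)] = True
--                     yield (i, j)
-- ===== SOURCE B (Python) =====
-- def create_radial_offsets_coords(radius):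
--     # emit, for each radius r, only the ring max(|i|,|j|) == r, in product order
--     for r in range(1, radius + 1):
--         for i in range(-r, r + 1):
--             if i == -r or i == r:
--                 for j in range(-r, r + 1):
--                     yield (i, j)
--             else:
--                 yield (i, -r)
--                 yield (i, r)
-- ===== Notes on version B (the rewrite author's own statement) =====
-- stated objective: faster
-- what changed: Instead of re-scanning the full (2r+1)x(2r+1) product for every r and filtering against a seen-dict, B generates each Chebyshev ring max(|i|,|j|)==r directly (full rows at i=±r, only j=±r otherwise), so no dict and no interior re-scan.
import Mathlib
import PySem

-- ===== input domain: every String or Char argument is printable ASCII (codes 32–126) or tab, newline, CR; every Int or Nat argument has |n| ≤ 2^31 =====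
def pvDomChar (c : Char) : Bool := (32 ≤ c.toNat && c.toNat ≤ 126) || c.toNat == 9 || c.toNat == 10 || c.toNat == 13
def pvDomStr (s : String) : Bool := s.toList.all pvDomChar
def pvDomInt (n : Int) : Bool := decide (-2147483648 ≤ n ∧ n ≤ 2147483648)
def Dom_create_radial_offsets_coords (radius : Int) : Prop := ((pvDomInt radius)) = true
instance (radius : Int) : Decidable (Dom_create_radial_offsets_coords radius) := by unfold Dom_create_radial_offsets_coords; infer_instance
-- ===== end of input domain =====

-- B replaces A's full-square re-scan with seen-dict by direct generation of each
-- Chebyshev ring (asymptotically faster); both Pythons are generators, equality is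
-- about the yielded sequence (as a list).

-- ===== PORT A =====
-- the body of A's inner `if`: filter against the seen-dict, record and yield
def pvStepA (st : PySem.Dict (Int × Int) Bool × List (Int × Int)) (p : Int × Int) :
    PySem.Dict (Int × Int) Bool × List (Int × Int) :=
  if p ≠ (0, 0) ∧ st.1.getD p false = false then (st.1.insert p true, st.2 ++ [p]) else st

-- itertools.product(range(-r, r+1), repeat=2)
def pvProductA (r : Int) : List (Int × Int) :=
  (PySem.List.pyRange (-r) (r + 1) 1).flatMap
    (fun i => (PySem.List.pyRange (-r) (r + 1) 1).map (fun j => (i, j)))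

def create_radial_offsets_coords (radius : Int) : List (Int × Int) :=
  ((PySem.List.pyRange 1 (radius + 1) 1).foldl
      (fun st r => (pvProductA r).foldl pvStepA st)
      ((PySem.Dict.empty : PySem.Dict (Int × Int) Bool), [])).2

-- ===== PORT B =====
-- one ring: full rows at i = ±r, only the two border cells otherwise
def pvRing (r : Int) : List (Int × Int) :=
  (PySem.List.pyRange (-r) (r + 1) 1).flatMap
    (fun i =>
      if i = -r ∨ i = r then (PySem.List.pyRange (-r) (r + 1) 1).map (fun j => (i, j))
      else [(i, -r), (i, r)])

def create_radial_offsets_coords_alt (radius : Int) : List (Int × Int) :=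
  (PySem.List.pyRange 1 (radius + 1) 1).flatMap pvRing

-- ===== PRECONDITION & SPEC =====
def Spec_create_radial_offsets_coords (radius : Int) (out : List (Int × Int)) : Prop := out = create_radial_offsets_coords_alt radius
instance (radius : Int) (out : List (Int × Int)) : Decidable (Spec_create_radial_offsets_coords radius out) := by unfold Spec_create_radial_offsets_coords; infer_instance

-- ===== CLAIM (what is proved, stated in full; the proofs are below) =====
def Claim_equal_create_radial_offsets_coords : Prop := ∀ (radius : Int), Dom_create_radial_offsets_coords radius → Spec_create_radial_offsets_coords radius (create_radial_offsets_coords radius)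

-- ===== LEMMAS AND PROOFS =====

-- membership in A's seen-dict after radii 1..s: nonzero cells of Chebyshev box s
def pvSeen (s : Int) (p : Int × Int) : Bool :=
  decide (p ≠ (0, 0) ∧ -s ≤ p.1 ∧ p.1 ≤ s ∧ -s ≤ p.2 ∧ p.2 ≤ s)

-- the Bool form of A's inner test against a fixed dict
def pvPred (d : PySem.Dict (Int × Int) Bool) (p : Int × Int) : Bool :=
  decide (p ≠ (0, 0) ∧ d.getD p false = false)

lemma pvProductA_nodup (r : Int) : (pvProductA r).Nodup :=
  List.Nodup.product (PySem.List.nodup_pyRange_one _ _) (PySem.List.nodup_pyRange_one _ _)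

lemma pvMem_productA (r : Int) (q : Int × Int) :
    q ∈ pvProductA r ↔ (-r ≤ q.1 ∧ q.1 ≤ r ∧ -r ≤ q.2 ∧ q.2 ≤ r) := by
  obtain ⟨a, b⟩ := q
  simp only [pvProductA, List.mem_flatMap, List.mem_map, PySem.List.mem_pyRange_one,
    Prod.mk.injEq]
  constructor
  · rintro ⟨i, ⟨h1, h2⟩, j, ⟨h3, h4⟩, rfl, rfl⟩; omega
  · rintro ⟨h1, h2, h3, h4⟩; exact ⟨a, by omega, b, by omega, rfl, rfl⟩

-- what the inner double loop does over ANY Nodup cell list: append the fresh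
-- nonzero cells in order, and mark them in the dict
lemma pvFoldl_step_spec (L : List (Int × Int)) (hL : L.Nodup) :
    ∀ (d : PySem.Dict (Int × Int) Bool) (acc : List (Int × Int)),
      (L.foldl pvStepA (d, acc)).2 = acc ++ L.filter (pvPred d) ∧
      ∀ q, (L.foldl pvStepA (d, acc)).1.getD q false
            = (d.getD q false || (decide (q ∈ L) && decide (q ≠ (0, 0)))) := by
  induction L with
  | nil => intro d acc; simp
  | cons p L ih =>
    intro d acc
    obtain ⟨hpL, hndL⟩ := List.nodup_cons.mp hL
    by_cases hc : p ≠ (0, 0) ∧ d.getD p false = false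
    · have h1 := ih hndL (d.insert p true) (acc ++ [p])
      have hstep : pvStepA (d, acc) p = (d.insert p true, acc ++ [p]) := by
        simp [pvStepA, hc]
      constructor
      · rw [List.foldl_cons, hstep, h1.1]
        have hfe : L.filter (pvPred (d.insert p true)) = L.filter (pvPred d) := by
          apply List.filter_congr
          intro x hx
          have hxp : x ≠ p := fun h => hpL (h ▸ hx)
          simp [pvPred, PySem.Dict.getD_insert, hxp]
        rw [hfe, List.filter_cons]
        simp [pvPred, hc]
      · intro q
        rw [List.foldl_cons, hstep, h1.2 q]
        by_cases hqp : q = p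
        · subst hqp
          simp [PySem.Dict.getD_insert_self, hc.2, hc.1]
        · simp [PySem.Dict.getD_insert, hqp, List.mem_cons]
    · have hstep : pvStepA (d, acc) p = (d, acc) := by
        simp only [pvStepA, if_neg hc]
      have h1 := ih hndL d acc
      constructor
      · rw [List.foldl_cons, hstep, h1.1, List.filter_cons]
        simp [pvPred, hc]
      · intro q
        rw [List.foldl_cons, hstep, h1.2 q]
        by_cases hqp : q = p
        · subst hqp
          rcases not_and_or.mp hc with h | h
          · have : q = (0, 0) := not_not.mp h
            simp [this]
          · have : d.getD q false = true := by
              cases hdq : d.getD q false with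
              | false => exact absurd hdq h
              | true => rfl
            simp [this]
        · simp [List.mem_cons, hqp]
    
-- the j-range filtered down to its two endpoints
lemma pvRange_filter_ends (r : Int) (hr : 1 ≤ r) :
    (PySem.List.pyRange (-r) (r + 1) 1).filter (fun j => decide (j = -r ∨ j = r)) = [-r, r] := by
  rw [PySem.List.pyRange_one_cons (by omega),
      PySem.List.pyRange_one_append (-r + 1) r (r + 1) (by omega) (by omega),
      PySem.List.pyRange_one_singleton]
  rw [List.filter_cons, List.filter_append]
  have hmid : (PySem.List.pyRange (-r + 1) r 1).filter (fun j => decide (j = -r ∨ j = r)) = [] := by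
    apply List.filter_eq_nil_iff.mpr
    intro x hx
    have := (PySem.List.mem_pyRange_one).mp hx
    simp only [decide_eq_true_eq]
    omega
  rw [hmid]
  simp

-- A's inner test against the stage-(r-1) dict selects exactly B's ring
lemma pvFilter_eq_ring (r : Int) (hr : 1 ≤ r) :
    (pvProductA r).filter (fun p => decide (p ≠ (0, 0) ∧ pvSeen (r - 1) p = false)) = pvRing r := by
  unfold pvProductA pvRing
  rw [List.filter_flatMap]
  apply List.flatMap_congr
  intro i hi
  have hib := (PySem.List.mem_pyRange_one).mp hi
  rw [List.filter_map]
  by_cases hedge : i = -r ∨ i = r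
  · rw [if_pos hedge]
    congr 1
    apply List.filter_eq_self.mpr
    intro j hj
    simp only [Function.comp_apply, decide_eq_true_eq]
    refine ⟨?_, ?_⟩
    · intro h
      rw [Prod.mk.injEq] at h
      omega
    · rw [pvSeen, decide_eq_false_iff_not]
      rintro ⟨-, h1, h2, -⟩
      omega
  · rw [if_neg hedge]
    have hcongr : (PySem.List.pyRange (-r) (r + 1) 1).filter
        ((fun p => decide (p ≠ (0, 0) ∧ pvSeen (r - 1) p = false)) ∘ (fun j => (i, j)))
        = (PySem.List.pyRange (-r) (r + 1) 1).filter (fun j => decide (j = -r ∨ j = r)) := by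
      apply List.filter_congr
      intro j hj
      have hjb := (PySem.List.mem_pyRange_one).mp hj
      simp only [Function.comp_apply]
      rw [decide_eq_decide]
      have hiin : -(r - 1) ≤ i ∧ i ≤ r - 1 := by
        rcases not_or.mp hedge with ⟨h1, h2⟩
        omega
      constructor
      · rintro ⟨h0, hs⟩
        rw [pvSeen, decide_eq_false_iff_not] at hs
        by_contra hje
        rw [not_or] at hje
        exact hs ⟨h0, by omega, by omega, by omega, by omega⟩
      · intro hje
        refine ⟨?_, ?_⟩
        · intro h
          rw [Prod.mk.injEq] at h
          omega
        · rw [pvSeen, decide_eq_false_iff_not]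
          rintro ⟨-, -, -, h3, h4⟩
          omega
    rw [hcongr, pvRange_filter_ends r hr]
    rfl

-- marking ring r on top of box (r-1) gives box r
lemma pvSeen_update (r : Int) (q : Int × Int) :
    (pvSeen (r - 1) q || (decide (q ∈ pvProductA r) && decide (q ≠ (0, 0)))) = pvSeen r q := by
  obtain ⟨a, b⟩ := q
  apply Bool.eq_iff_iff.mpr
  rw [Bool.or_eq_true, Bool.and_eq_true]
  simp only [pvSeen, decide_eq_true_eq, pvMem_productA, ne_eq, Prod.mk.injEq, not_and]
  omega

-- outer loop invariant: with the dict holding box (lo-1), the remaining radii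
-- lo..lo+n-1 append exactly their rings
lemma pvOuter (n : Nat) : ∀ (lo : Int) (d : PySem.Dict (Int × Int) Bool)
    (acc : List (Int × Int)), 1 ≤ lo → (∀ q, d.getD q false = pvSeen (lo - 1) q) →
    ((PySem.List.pyRange lo (lo + n) 1).foldl (fun st r => (pvProductA r).foldl pvStepA st)
        (d, acc)).2
      = acc ++ (PySem.List.pyRange lo (lo + n) 1).flatMap pvRing := by
  induction n with
  | zero =>
    intro lo d acc _ _
    rw [show lo + (0 : Nat) = lo by omega, PySem.List.pyRange_one_eq_nil (le_refl lo)]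
    simp
  | succ n ih =>
    intro lo d acc hlo hd
    rw [PySem.List.pyRange_one_cons (by omega : lo < lo + (n + 1 : Nat))]
    rw [List.foldl_cons, List.flatMap_cons]
    have hspec := pvFoldl_step_spec (pvProductA lo) (pvProductA_nodup lo) d acc
    set st' := (pvProductA lo).foldl pvStepA (d, acc) with hst
    have hacc : st'.2 = acc ++ pvRing lo := by
      rw [hspec.1]
      congr 1
      rw [← pvFilter_eq_ring lo hlo]
      apply List.filter_congr
      intro x _
      simp [pvPred, hd x]
    have hdict : ∀ q, st'.1.getD q false = pvSeen lo q := by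
      intro q
      rw [hspec.2 q, hd q, pvSeen_update lo q]
    have harg : lo + (n + 1 : Nat) = (lo + 1) + n := by push_cast; ring
    rw [harg]
    have := ih (lo + 1) st'.1 st'.2 (by omega)
      (by intro q; rw [show lo + 1 - 1 = lo by ring]; exact hdict q)
    rw [← Prod.mk.eta (p := st')] at this ⊢
    rw [this, hacc, List.append_assoc]

-- ===== VERDICT (by name: the statement is the Claim_ definition above) =====
theorem create_radial_offsets_coords_spec : Claim_equal_create_radial_offsets_coords := by
  intro radius _
  show create_radial_offsets_coords radius = create_radial_offsets_coords_alt radius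
  unfold create_radial_offsets_coords create_radial_offsets_coords_alt
  by_cases hneg : radius + 1 ≤ 1
  · rw [PySem.List.pyRange_one_eq_nil hneg]
    simp
  · have h1 : radius + 1 = 1 + (radius.toNat : Int) := by omega
    rw [h1]
    rw [pvOuter radius.toNat 1 PySem.Dict.empty [] (le_refl 1)
      (by
        intro q
        obtain ⟨a, b⟩ := q
        simp [PySem.Dict.getD_empty, pvSeen, Prod.ext_iff]
        omega)]
    simp
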